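-- pv_equiv track=rewrite | github.com/Akunor/freecodecamp | daily-challenges/2026.03.05 Challenge.py | smallest_gap
-- ===== SOURCE A (Python) =====
-- def smallest_gap(s):
--     last = {}
--     shortest = s
--     for i, char in enumerate(s):
--         if char in last:
--             gap = s[last[char] + 1:i]
--             if len(gap) < len(shortest):
--                 shortest = gap
--             last[char] = i
--         else:
--             last[char] = i
--     return shortest
-- ===== SOURCE B (Python) =====
-- def smallest_gap(s):
--     # Group occurrence indices per character, then pick the best consecutive
--     # pair (minimizing (gap length, second index)) and slice once at the end.
--     occ = {}
--     for i, ch in enumerate(s):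
--         occ.setdefault(ch, []).append(i)
--     best = None  # (length, cur, prev)
--     for idxs in occ.values():
--         for prev, cur in zip(idxs, idxs[1:]):
--             length = cur - prev - 1
--             if best is None or length < best[0] or (length == best[0] and cur < best[1]):
--                 best = (length, cur, prev)
--     if best is None:
--         return s
--     _, cur, prev = best
--     return s[prev + 1:cur]
-- ===== Notes on version B (the rewrite author's own statement) =====
-- stated objective: alternative
-- what changed: B replaces A's single scan with a running last-occurrence dict and a string slice per candidate by a group-by-character occurrence-index table: it scans consecutive index pairs within each character's index list, keeps the argmin of (gap length, second index) as indices only, and slices the string exactly once at the end.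
import Mathlib
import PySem

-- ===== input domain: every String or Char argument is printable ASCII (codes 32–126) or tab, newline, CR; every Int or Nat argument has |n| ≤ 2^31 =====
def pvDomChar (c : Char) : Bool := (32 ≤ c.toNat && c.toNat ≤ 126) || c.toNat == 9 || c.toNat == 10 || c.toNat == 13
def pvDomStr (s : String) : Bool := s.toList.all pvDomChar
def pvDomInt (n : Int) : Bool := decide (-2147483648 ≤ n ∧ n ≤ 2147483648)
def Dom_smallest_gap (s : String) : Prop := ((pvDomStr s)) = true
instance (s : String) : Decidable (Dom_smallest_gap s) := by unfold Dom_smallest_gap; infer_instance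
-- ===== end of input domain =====

-- B replaces A's running last-occurrence dict (slicing every candidate gap) by a
-- group-by-character occurrence-index table, picking the argmin of (gap length,
-- second index) over consecutive pairs and slicing once; objective: alternative.

-- ===== PORT A =====
def smallest_gap (s : String) : String :=
  let st :=
    (PySem.List.enumerate s.toList).foldl
      (fun (st : PySem.Dict Char Int × String) (p : Int × Char) =>
        let last := st.1
        let shortest := st.2
        let i := p.1
        let ch := p.2
        if last.contains ch then
          let gap := PySem.Str.slice s (some (last.getD ch 0 + 1)) (some i)
          let shortest := if PySem.Str.len gap < PySem.Str.len shortest then gap else shortest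
          (last.insert ch i, shortest)
        else
          (last.insert ch i, shortest))
      (PySem.Dict.empty, s)
  st.2

-- ===== PORT B =====
def smallest_gap_alt (s : String) : String :=
  let occ : PySem.Dict Char (List Int) :=
    (PySem.List.enumerate s.toList).foldl
      (fun (d : PySem.Dict Char (List Int)) (p : Int × Char) =>
        d.insert p.2 (d.getD p.2 [] ++ [p.1]))
      PySem.Dict.empty
  let best : Option (Int × Int × Int) :=
    occ.values.foldl
      (fun b idxs =>
        (idxs.zip idxs.tail).foldl
          (fun (b : Option (Int × Int × Int)) (pc : Int × Int) =>
            let prev := pc.1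
            let cur := pc.2
            let length := cur - prev - 1
            match b with
            | none => some (length, cur, prev)
            | some (bl, bc, bp) =>
                if length < bl ∨ (length = bl ∧ cur < bc) then some (length, cur, prev)
                else some (bl, bc, bp))
          b)
      none
  match best with
  | none => s
  | some (_, cur, prev) => PySem.Str.slice s (some (prev + 1)) (some cur)

-- ===== PRECONDITION & SPEC =====
def Spec_smallest_gap (s : String) (out : String) : Prop := out = smallest_gap_alt s
instance (s : String) (out : String) : Decidable (Spec_smallest_gap s out) := by unfold Spec_smallest_gap; infer_instance

-- ===== CLAIM (what is proved, stated in full; the proofs are below) =====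
def Claim_equal_smallest_gap : Prop := ∀ (s : String), Dom_smallest_gap s → Spec_smallest_gap s (smallest_gap s)

-- ===== LEMMAS AND PROOFS =====


def occsL (l : List Char) (c : Char) : List Nat :=
  (List.range l.length).filter (fun i => decide (l[i]? = some c))

def prevOcc (l : List Char) (i : Nat) : Option Nat :=
  ((List.range i).filter (fun j => decide (l[j]? = l[i]?))).getLast?

def candsA (l : List Char) : List (Nat × Nat) :=
  (List.range l.length).filterMap (fun i => (prevOcc l i).map (fun j => (j, i)))

def candsB (l : List Char) : List (Nat × Nat) :=
  (PySem.Set.ofList l).flatMap (fun c => (occsL l c).zip (occsL l c).tail)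

def CandP (l : List Char) (p : Nat × Nat) : Prop :=
  p.1 < p.2 ∧ p.2 < l.length ∧ l[p.1]? = l[p.2]? ∧
    ∀ k, p.1 < k → k < p.2 → l[k]? ≠ l[p.2]?

theorem getLast?_filter_range {m : Nat} {q : Nat → Bool} {j : Nat} :
    ((List.range m).filter q).getLast? = some j ↔
      j < m ∧ q j = true ∧ ∀ k, j < k → k < m → ¬ q k = true := by
  induction m with
  | zero => simp
  | succ m ih =>
    rw [List.range_succ, List.filter_append]
    by_cases hq : q m
    · rw [show List.filter q [m] = [m] from by simp [hq]]
      rw [List.getLast?_concat]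
      simp only [Option.some_inj]
      constructor
      · rintro rfl
        exact ⟨Nat.lt_succ_self m, hq, by omega⟩
      · rintro ⟨hj, hqj, hmax⟩
        by_contra hne
        exact hmax m (by omega) (Nat.lt_succ_self m) hq
    · rw [show List.filter q [m] = [] from by simp [hq], List.append_nil, ih]
      constructor
      · rintro ⟨hj, hqj, hmax⟩
        refine ⟨by omega, hqj, ?_⟩
        intro k h1 h2
        rcases Nat.lt_succ_iff_lt_or_eq.mp h2 with h | rfl
        · exact hmax k h1 h
        · simpa using hq
      · rintro ⟨hj, hqj, hmax⟩
        have hjm : j ≠ m := by rintro rfl; exact hq hqj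
        refine ⟨by omega, hqj, fun k h1 h2 => hmax k h1 (by omega)⟩

theorem prevOcc_spec {l : List Char} {i j : Nat} :
    prevOcc l i = some j ↔
      j < i ∧ l[j]? = l[i]? ∧ ∀ k, j < k → k < i → l[k]? ≠ l[i]? := by
  rw [prevOcc, getLast?_filter_range]
  simp only [decide_eq_true_eq]

theorem mem_candsA {l : List Char} {p : Nat × Nat} : p ∈ candsA l ↔ CandP l p := by
  rcases p with ⟨j, i⟩
  simp only [candsA, List.mem_filterMap, List.mem_range, Option.map_eq_some_iff]
  constructor
  · rintro ⟨i', hi', j', hj', heq⟩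
    cases heq
    obtain ⟨h1, h2, h3⟩ := prevOcc_spec.mp hj'
    exact ⟨h1, hi', h2, h3⟩
  · rintro ⟨h1, h2, h3, h4⟩
    exact ⟨i, h2, j, prevOcc_spec.mpr ⟨h1, h3, h4⟩, rfl⟩

theorem mem_occsL {l : List Char} {c : Char} {i : Nat} :
    i ∈ occsL l c ↔ i < l.length ∧ l[i]? = some c := by
  simp [occsL]

theorem sorted_occsL {l : List Char} {c : Char} : (occsL l c).Pairwise (· < ·) :=
  List.Pairwise.filter _ List.pairwise_lt_range

theorem mem_zip_tail {o : List Nat} (ho : o.Pairwise (· < ·)) {p : Nat × Nat} :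
    p ∈ o.zip o.tail ↔
      p.1 ∈ o ∧ p.2 ∈ o ∧ p.1 < p.2 ∧ ∀ x ∈ o, x ≤ p.1 ∨ p.2 ≤ x := by
  rcases p with ⟨a, b⟩
  have hget := List.pairwise_iff_getElem.mp ho
  have hlen : ∀ m, m < (o.zip o.tail).length → m + 1 < o.length := by
    intro m hm
    rcases o with _ | ⟨x, o'⟩
    · simp at hm
    · simp [List.length_zip] at hm ⊢; omega
  have hzip : ∀ m (hm : m < (o.zip o.tail).length),
      (o.zip o.tail)[m] = (o[m]'(by have := hlen m hm; omega), o[m+1]'(hlen m hm)) := by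
    intro m hm
    have h1 := hlen m hm
    rw [List.getElem_zip]
    rcases o with _ | ⟨x, o'⟩
    · simp at hm
    · simp
  have hlen' : ∀ m, m + 1 < o.length → m < (o.zip o.tail).length := by
    intro m hm
    rcases o with _ | ⟨x, o'⟩
    · simp at hm
    · simp [List.length_zip] at hm ⊢; omega
  constructor
  · intro hmem
    obtain ⟨m, hm, hab⟩ := List.mem_iff_getElem.mp hmem
    rw [hzip m hm] at hab
    have hm2 := hlen m hm
    obtain ⟨rfl, rfl⟩ : o[m]'(by omega) = a ∧ o[m+1]'hm2 = b :=
      ⟨congrArg Prod.fst hab, congrArg Prod.snd hab⟩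
    refine ⟨List.getElem_mem _, List.getElem_mem _, hget m (m+1) (by omega) hm2 (by omega), ?_⟩
    intro x hx
    obtain ⟨t, ht, rfl⟩ := List.mem_iff_getElem.mp hx
    rcases Nat.lt_or_ge t m with h' | h'
    · exact Or.inl (le_of_lt (hget t m ht (by omega) h'))
    · rcases Nat.eq_or_lt_of_le h' with rfl | h''
      · exact Or.inl (le_refl _)
      · rcases Nat.eq_or_lt_of_le h'' with h3 | h3
      

        · exact Or.inr (le_of_eq (by simp [← h3]))
        · exact Or.inr (le_of_lt (hget (m+1) t hm2 ht h3))
  · rintro ⟨ha, hb, hab, hbetween⟩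
    obtain ⟨m, hm, rfl⟩ := List.mem_iff_getElem.mp ha
    obtain ⟨t, ht, rfl⟩ := List.mem_iff_getElem.mp hb
    have hmt : m < t := by
      rcases Nat.lt_trichotomy m t with h | h | h
      · exact h
      · have h2 : o[m]'hm < o[t]'ht := hab
        subst h
        exact absurd h2 (lt_irrefl _)
      · have := hget t m ht hm h; omega
    have ht1 : t = m + 1 := by
      by_contra hc
      have hmid : m + 1 < t := by omega
      have h1 := hget m (m+1) hm (by omega) (by omega)
      have h2 := hget (m+1) t (by omega) ht hmid
      have := hbetween (o[m+1]'(by omega)) (List.getElem_mem _)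
      omega
    subst ht1
    apply List.mem_iff_getElem.mpr
    refine ⟨m, hlen' m ht, ?_⟩
    rw [hzip m (hlen' m ht)]

def selFold (pick : Nat × Nat → Nat × Nat → Bool) (b : Option (Nat × Nat)) (ps : List (Nat × Nat)) : Option (Nat × Nat) :=
  ps.foldl (fun b p => match b with
    | none => some p
    | some q => if pick p q then some p else some q) b

def pickLen (p q : Nat × Nat) : Bool := decide (p.2 - p.1 - 1 < q.2 - q.1 - 1)

def pickLex (p q : Nat × Nat) : Bool :=
  decide (p.2 - p.1 - 1 < q.2 - q.1 - 1 ∨ (p.2 - p.1 - 1 = q.2 - q.1 - 1 ∧ p.2 < q.2))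

theorem selFold_append (pick) (b) (ps qs) :
    selFold pick b (ps ++ qs) = selFold pick (selFold pick b ps) qs := by
  simp [selFold, List.foldl_append]

theorem selFold_singleton_none (pick) (p) :
    selFold pick none [p] = some p := rfl

theorem selFold_singleton_some (pick) (q) (p) :
    selFold pick (some q) [p] = if pick p q then some p else some q := rfl

theorem selFold_mem {pick : Nat × Nat → Nat × Nat → Bool} {b : Option (Nat × Nat)}
    {ps : List (Nat × Nat)} {q : Nat × Nat} (h : selFold pick b ps = some q) :
    (∃ q', b = some q' ∧ q = q') ∨ q ∈ ps := by
  induction ps generalizing b with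
  | nil => exact Or.inl ⟨q, h, rfl⟩
  | cons p ps ih =>
    rcases ih h with ⟨q', hq', rfl⟩ | hmem
    · cases b with
      | none => simp at hq'; simp [hq']
      | some r =>
        by_cases hp : pick p r
        · simp [hp] at hq'; simp [hq']
        · simp [hp] at hq'; exact Or.inl ⟨r, rfl, hq'.symm⟩
    · exact Or.inr (List.mem_cons_of_mem _ hmem)

theorem selFold_some_ne_none {pick : Nat × Nat → Nat × Nat → Bool} (ps : List (Nat × Nat)) (r : Nat × Nat) :
    selFold pick (some r) ps ≠ none := by
  induction ps generalizing r with
  | nil => simp [selFold]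
  | cons x xs ih =>
    show selFold pick (if pick x r then some x else some r) xs ≠ none
    by_cases hx : pick x r <;> simp [hx] <;> apply ih

theorem selFold_none {pick : Nat × Nat → Nat × Nat → Bool} {ps : List (Nat × Nat)} :
    selFold pick none ps = none ↔ ps = [] := by
  cases ps with
  | nil => simp [selFold]
  | cons p ps =>
    constructor
    · intro h; exact absurd h (selFold_some_ne_none ps p)
    · intro h; cases h

theorem selFold_len_eq_lex {ps : List (Nat × Nat)}
    (hs : ps.Pairwise (fun p q => p.2 < q.2)) :
    selFold pickLen none ps = selFold pickLex none ps := by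
  induction ps using List.reverseRecOn with
  | nil => rfl
  | append_singleton ps p ih =>
    have hs' := (List.pairwise_append.mp hs).1
    have hlt : ∀ q ∈ ps, q.2 < p.2 := by
      intro q hq
      exact (List.pairwise_append.mp hs).2.2 q hq p (List.mem_singleton_self p)
    rw [selFold_append, selFold_append, ih hs']
    rcases h : selFold pickLex none ps with _ | q
    · rw [selFold_singleton_none, selFold_singleton_none]
    · rw [selFold_singleton_some, selFold_singleton_some]
      congr 1
      have hq : q ∈ ps := by
        rcases selFold_mem h with ⟨q', hq', _⟩ | hmem
        · cases hq'
        · exact hmem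
      have h2 : q.2 < p.2 := hlt q hq
      simp only [pickLen, pickLex, decide_eq_true_eq, eq_iff_iff]
      omega

theorem selFold_lex_min {ps : List (Nat × Nat)} {q : Nat × Nat}
    (h : selFold pickLex none ps = some q) :
    q ∈ ps ∧ ∀ p ∈ ps, pickLex p q = false := by
  induction ps using List.reverseRecOn generalizing q with
  | nil => cases h
  | append_singleton ps p ih =>
    rw [selFold_append] at h
    rcases h0 : selFold pickLex none ps with _ | q0
    · rw [h0, selFold_singleton_none] at h
      have : ps = [] := selFold_none.mp h0
      subst this
      cases h
      refine ⟨List.mem_singleton_self p, ?_⟩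
      intro x hx
      simp at hx; subst hx
      simp [pickLex]
    · rw [h0, selFold_singleton_some] at h
      obtain ⟨hq0mem, hq0min⟩ := ih h0
      by_cases hp : pickLex p q0
      · rw [if_pos hp] at h
        cases h
        refine ⟨List.mem_append_right _ (List.mem_singleton_self _), ?_⟩
        intro x hx
        rcases List.mem_append.mp hx with hx | hx
        · have hxq0 := hq0min x hx
          simp only [pickLex, decide_eq_true_eq] at hp
          simp only [pickLex, decide_eq_false_iff_not] at hxq0 ⊢
          omega
        · simp at hx; subst hx; simp [pickLex]
      · rw [if_neg hp] at h
        cases h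
        refine ⟨List.mem_append_left _ hq0mem, ?_⟩
        intro x hx
        rcases List.mem_append.mp hx with hx | hx
        · exact hq0min x hx
        · simp at hx; subst hx; exact Bool.eq_false_iff.mpr hp

theorem selFold_lex_ext {ps qs : List (Nat × Nat)}
    (hps : ∀ p ∈ ps, p.1 < p.2) (hqs : ∀ p ∈ qs, p.1 < p.2)
    (hmem : ∀ p, p ∈ ps ↔ p ∈ qs) :
    selFold pickLex none ps = selFold pickLex none qs := by
  rcases h1 : selFold pickLex none ps with _ | q1 <;> rcases h2 : selFold pickLex none qs with _ | q2
  · rfl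
  · have : ps = [] := selFold_none.mp h1
    subst this
    have : q2 ∈ qs := (selFold_lex_min h2).1
    rw [← hmem] at this
    cases this
  · have : qs = [] := selFold_none.mp h2
    subst this
    have : q1 ∈ ps := (selFold_lex_min h1).1
    rw [hmem] at this
    cases this
  · obtain ⟨hm1, hmin1⟩ := selFold_lex_min h1
    obtain ⟨hm2, hmin2⟩ := selFold_lex_min h2
    have h12 := hmin1 q2 ((hmem q2).mpr hm2)
    have h21 := hmin2 q1 ((hmem q1).mp hm1)
    have hq1 := hps q1 hm1
    have hq2 := hqs q2 hm2
    simp only [pickLex, decide_eq_false_iff_not] at h12 h21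
    have : q1.1 = q2.1 ∧ q1.2 = q2.2 := by omega
    have : q1 = q2 := Prod.ext this.1 this.2
    rw [this]

def renderS (s : String) (r : Option (Nat × Nat)) : String :=
  match r with
  | none => s
  | some q => PySem.Str.slice s (some ((q.1 : Int) + 1)) (some (q.2 : Int))

theorem occsL_append_singleton (t : List Char) (c x : Char) :
    occsL (t ++ [c]) x = occsL t x ++ (if c = x then [t.length] else []) := by
  simp only [occsL, List.length_append, List.length_singleton, List.range_succ, List.filter_append]
  congr 1
  · apply List.filter_congr
    intro i hi
    rw [List.mem_range] at hi
    rw [List.getElem?_append_left hi]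
  · simp only [List.filter_singleton]
    rw [List.getElem?_append_right (le_refl _)]
    simp only [Nat.sub_self, List.getElem?_cons_zero]
    by_cases h : c = x <;> simp [h]

theorem prevOcc_append_lt {t : List Char} {c : Char} {i : Nat} (hi : i < t.length) :
    prevOcc (t ++ [c]) i = prevOcc t i := by
  simp only [prevOcc]
  congr 1
  apply List.filter_congr
  intro j hj
  rw [List.mem_range] at hj
  rw [List.getElem?_append_left (by omega), List.getElem?_append_left hi]

theorem prevOcc_append_self (t : List Char) (c : Char) :
    prevOcc (t ++ [c]) t.length = (occsL t c).getLast? := by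
  simp only [prevOcc, occsL]
  congr 1
  apply List.filter_congr
  intro j hj
  rw [List.mem_range] at hj
  rw [List.getElem?_append_left hj, List.getElem?_append_right (le_refl _)]
  simp

theorem candsA_append (t : List Char) (c : Char) :
    candsA (t ++ [c]) =
      candsA t ++ ((occsL t c).getLast?.map (fun j => (j, t.length))).toList := by
  simp only [candsA, List.length_append, List.length_singleton, List.range_succ,
    List.filterMap_append]
  congr 1
  · apply List.filterMap_congr
    intro i hi
    rw [List.mem_range] at hi
    rw [prevOcc_append_lt hi]
  · rw [show (List.filterMap (fun i => (prevOcc (t ++ [c]) i).map (fun j => (j, i))) [t.length])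
        = ((prevOcc (t ++ [c]) t.length).map (fun j => (j, t.length))).toList from by
      simp [List.filterMap]
      rcases prevOcc (t ++ [c]) t.length with _ | j <;> simp]
    rw [prevOcc_append_self]

theorem occsL_ne_nil_of_mem {t : List Char} {c : Char} (hc : c ∈ t) : occsL t c ≠ [] := by
  obtain ⟨i, hi, rfl⟩ := List.mem_iff_getElem.mp hc
  intro h
  have : i ∈ occsL t t[i] := mem_occsL.mpr ⟨hi, List.getElem?_eq_getElem hi⟩
  rw [h] at this
  cases this

theorem len_slice_nat (s : String) (a b : Nat) (hab : a ≤ b) (hb : b ≤ s.toList.length) :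
    PySem.Str.len (PySem.Str.slice s (some (a : Int)) (some (b : Int))) = ((b - a : Nat) : Int) := by
  rw [PySem.Str.len_eq, PySem.Str.toList_slice, PySem.Chars.slice_eq_listSlice]
  rw [show (PySem.List.slice s.toList (some (a : Int)) (some (b : Int))).length
      = PySem.List.clampIdx s.toList.length (b : Int) - PySem.List.clampIdx s.toList.length (a : Int)
    from PySem.List.length_slice ..]
  rw [PySem.List.clampIdx_natCast, PySem.List.clampIdx_natCast]
  omega


theorem ofList_append_singleton {α : Type} [BEq α] [LawfulBEq α] (t : List α) (c : α) :
    PySem.Set.ofList (t ++ [c]) =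
      if c ∈ t then PySem.Set.ofList t else PySem.Set.ofList t ++ [c] := by
  rw [PySem.Set.ofList, List.foldl_append]
  rw [← PySem.Set.ofList]
  show PySem.Set.add _ c = _
  rw [PySem.Set.add]
  by_cases h : c ∈ t
  · rw [if_pos h, if_pos]
    show List.contains _ c = true
    rw [List.contains_iff_mem, PySem.Set.mem_ofList]
    exact h
  · rw [if_neg h, if_neg]
    show ¬ List.contains _ c = true
    rw [List.contains_iff_mem, PySem.Set.mem_ofList]
    exact h

theorem find?_beq_of_nodup {α : Type} [BEq α] [LawfulBEq α] {S : List α} (hS : S.Nodup)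
    {c : α} (hc : c ∈ S) : S.find? (fun x => x == c) = some c := by
  induction S with
  | nil => cases hc
  | cons a S ih =>
    rcases List.mem_cons.mp hc with rfl | hc'
    · simp [List.find?_cons_of_pos]
    · have ha : (a == c) = false := by
        rw [beq_eq_false_iff_ne]
        rintro rfl
        exact (List.nodup_cons.mp hS).1 hc'
      rw [List.find?_cons_of_neg (by simp [ha])]
      exact ih (List.nodup_cons.mp hS).2 hc'

theorem find?_beq_of_not_mem {α : Type} [BEq α] [LawfulBEq α] {S : List α}
    {c : α} (hc : c ∉ S) : S.find? (fun x => x == c) = none := by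
  rw [List.find?_eq_none]
  intro x hx
  simp only [beq_iff_eq]
  rintro rfl
  exact hc hx

theorem get?_mk_map {ν : Type} (t : List Char) (v : Char → ν) (c : Char) :
    (PySem.Dict.mk ((PySem.Set.ofList t).map (fun x => (x, v x)))).get? c =
      if c ∈ t then some (v c) else none := by
  rw [PySem.Dict.get?]
  show (List.find? (fun p => p.1 == c) ((PySem.Set.ofList t).map (fun x => (x, v x)))).map (·.2) = _
  rw [List.find?_map]
  rw [show ((fun p : Char × ν => p.1 == c) ∘ (fun x => (x, v x))) = (fun x => x == c) from rfl]
  by_cases hc : c ∈ t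
  · rw [find?_beq_of_nodup (PySem.Set.nodup_ofList t) ((PySem.Set.mem_ofList t c).mpr hc)]
    simp [hc]
  · rw [find?_beq_of_not_mem (fun h => hc ((PySem.Set.mem_ofList t c).mp h))]
    simp [hc]

theorem contains_mk_map {ν : Type} (t : List Char) (v : Char → ν) (c : Char) :
    (PySem.Dict.mk ((PySem.Set.ofList t).map (fun x => (x, v x)))).contains c = decide (c ∈ t) := by
  rw [PySem.Dict.contains]
  show (((PySem.Set.ofList t).map (fun x => (x, v x))).any fun p => p.1 == c) = _
  rw [List.any_map]
  rw [show ((fun p : Char × ν => p.1 == c) ∘ (fun x => (x, v x))) = (fun x => x == c) from rfl]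
  by_cases hc : c ∈ t
  · simp only [hc, decide_true]
    rw [List.any_eq_true]
    exact ⟨c, (PySem.Set.mem_ofList t c).mpr hc, by simp⟩
  · simp only [hc, decide_false]
    rw [List.any_eq_false]
    intro x hx
    simp only [beq_iff_eq]
    rintro rfl
    exact hc ((PySem.Set.mem_ofList t x).mp hx)

theorem insert_mk_map {ν : Type} (t : List Char) (v : Char → ν) (c : Char) (w : ν) :
    (PySem.Dict.mk ((PySem.Set.ofList t).map (fun x => (x, v x)))).insert c w =
      PySem.Dict.mk ((PySem.Set.ofList (t ++ [c])).map
        (fun x => (x, if x = c then w else v x))) := by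
  rw [PySem.Dict.insert, ofList_append_singleton]
  by_cases hc : c ∈ t
  · rw [if_pos (by rw [contains_mk_map]; simp [hc]), if_pos hc]
    congr 1
    rw [List.map_map]
    apply List.map_congr_left
    intro x _
    by_cases hx : x = c
    · subst hx; simp
    · simp [hx]
  · rw [if_neg (by rw [contains_mk_map]; simp [hc]), if_neg hc]
    congr 1
    rw [List.map_append]
    congr 1
    · apply List.map_congr_left
      intro x hx
      have hxc : x ≠ c := by
        rintro rfl
        exact hc ((PySem.Set.mem_ofList t x).mp hx)
      simp [hxc]
    · simp



theorem occsL_eq_nil_of_not_mem {t : List Char} {c : Char} (hc : c ∉ t) : occsL t c = [] := by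
  rw [List.eq_nil_iff_forall_not_mem]
  intro i hi
  rw [mem_occsL] at hi
  exact hc (List.mem_of_getElem? hi.2)

-- A's loop computes renderS of the length-min fold over candsA
theorem A_loop (s : String) (t : List Char) (ht : t.length ≤ s.toList.length) :
    ((PySem.List.enumerate t).foldl
      (fun (st : PySem.Dict Char Int × String) (p : Int × Char) =>
        let last := st.1
        let shortest := st.2
        let i := p.1
        let ch := p.2
        if last.contains ch then
          let gap := PySem.Str.slice s (some (last.getD ch 0 + 1)) (some i)
          let shortest := if PySem.Str.len gap < PySem.Str.len shortest then gap else shortest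
          (last.insert ch i, shortest)
        else
          (last.insert ch i, shortest))
      (PySem.Dict.empty, s)) =
    (⟨(PySem.Set.ofList t).map (fun c => (c, (((occsL t c).getLast?).getD 0 : Int)))⟩,
      renderS s (selFold pickLen none (candsA t))) := by
  induction t using List.reverseRecOn with
  | nil =>
    simp [PySem.List.enumerate, PySem.Set.ofList, PySem.Set.empty, PySem.Dict.empty, candsA,
      renderS, selFold]
  | append_singleton t c ih =>
    have ht' : t.length ≤ s.toList.length := by
      rw [List.length_append, List.length_singleton] at ht; omega
    rw [PySem.List.enumerate_append, List.foldl_append, ih ht']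
    simp only [PySem.List.enumerate_cons, PySem.List.enumerate_nil, List.foldl_cons, List.foldl_nil,
      zero_add]
    have htlt : t.length < s.toList.length := by
      rw [List.length_append, List.length_singleton] at ht; omega
    by_cases hc : c ∈ t
    · have hne := occsL_ne_nil_of_mem hc
      obtain ⟨j, hj⟩ : ∃ j, (occsL t c).getLast? = some j := by
        rcases h : (occsL t c).getLast? with _ | j
        · exact absurd (List.getLast?_eq_none_iff.mp h) hne
        · exact ⟨j, rfl⟩
      have hjmem : j ∈ occsL t c := List.mem_of_getLast? hj
      have hjlt : j < t.length := (mem_occsL.mp hjmem).1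
      show (if _ then _ else _) = _
      rw [contains_mk_map, PySem.Dict.getD, get?_mk_map, if_pos hc]
      simp only [hc, decide_true, if_true, Option.getD_some, hj]
      rw [candsA_append, hj]
      simp only [Option.map_some, Option.toList_some]
      rw [selFold_append]
      rw [insert_mk_map]
      have hdict : (PySem.Set.ofList (t ++ [c])).map
            (fun x => (x, if x = c then (t.length : Int) else ((occsL t x).getLast?.getD 0 : Int))) =
          (PySem.Set.ofList (t ++ [c])).map
            (fun x => (x, ((occsL (t ++ [c]) x).getLast?.getD 0 : Int))) := by
        apply List.map_congr_left
        intro x _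
        by_cases hx : x = c
        · subst hx
          rw [occsL_append_singleton, if_pos rfl, if_pos rfl]
          rw [List.getLast?_concat]
          simp
        · rw [occsL_append_singleton, if_neg hx, if_neg (fun h => hx h.symm)]
          simp
      rw [hdict]
      have hlen_gap : PySem.Str.len (PySem.Str.slice s (some ((j : Int) + 1)) (some (t.length : Int)))
          = ((t.length - (j + 1) : Nat) : Int) := by
        rw [show ((j : Int) + 1) = ((j + 1 : Nat) : Int) from by push_cast; ring]
        exact len_slice_nat s (j+1) t.length (by omega) (by omega)
      rcases hr : selFold pickLen none (candsA t) with _ | q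
      · rw [selFold_singleton_none]
        have hlen_s : PySem.Str.len s = (s.toList.length : Int) := PySem.Str.len_eq s
        rw [show renderS s none = s from rfl]
        rw [if_pos (by rw [hlen_gap, hlen_s]; omega)]
        rfl
      · have hqmem : q ∈ candsA t := by
          rcases selFold_mem hr with ⟨q', hq', _⟩ | hmem
          · cases hq'
          · exact hmem
        obtain ⟨hq1, hq2, _, _⟩ := mem_candsA.mp hqmem
        rw [selFold_singleton_some]
        have hlen_q : PySem.Str.len (PySem.Str.slice s (some ((q.1 : Int) + 1)) (some (q.2 : Int)))
            = ((q.2 - (q.1 + 1) : Nat) : Int) := by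
          rw [show ((q.1 : Int) + 1) = ((q.1 + 1 : Nat) : Int) from by push_cast; ring]
          exact len_slice_nat s (q.1+1) q.2 (by omega) (by omega)
        rw [show renderS s (some q)
            = PySem.Str.slice s (some ((q.1 : Int) + 1)) (some (q.2 : Int)) from rfl]
        by_cases hcmp : t.length - j - 1 < q.2 - q.1 - 1
        · rw [if_pos (by rw [hlen_gap, hlen_q]; omega)]
          rw [if_pos (by simp only [pickLen]; exact decide_eq_true (by omega))]
          rfl
        · rw [if_neg (by rw [hlen_gap, hlen_q]; omega)]
          rw [if_neg (by simp only [pickLen, decide_eq_true_eq]; omega)]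
          rfl
    · have hnil := occsL_eq_nil_of_not_mem hc
      show (if _ then _ else _) = _
      rw [contains_mk_map]
      simp only [hc, decide_false, Bool.false_eq_true, if_false]
      rw [candsA_append, hnil]
      simp only [List.getLast?_nil, Option.map_none, Option.toList_none, List.append_nil]
      rw [insert_mk_map]
      have hdict : (PySem.Set.ofList (t ++ [c])).map
            (fun x => (x, if x = c then (t.length : Int) else ((occsL t x).getLast?.getD 0 : Int))) =
          (PySem.Set.ofList (t ++ [c])).map
            (fun x => (x, ((occsL (t ++ [c]) x).getLast?.getD 0 : Int))) := by
        apply List.map_congr_left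
        intro x _
        by_cases hx : x = c
        · subst hx
          rw [occsL_append_singleton, if_pos rfl, if_pos rfl, hnil]
          simp
        · rw [occsL_append_singleton, if_neg hx, if_neg (fun h => hx h.symm)]
          simp
      rw [hdict]

theorem mem_candsB {l : List Char} {p : Nat × Nat} : p ∈ candsB l ↔ CandP l p := by
  simp only [candsB, List.mem_flatMap, PySem.Set.mem_ofList]
  constructor
  · rintro ⟨c, hc, hp⟩
    rw [mem_zip_tail sorted_occsL] at hp
    obtain ⟨h1, h2, h3, h4⟩ := hp
    rw [mem_occsL] at h1 h2
    refine ⟨h3, h2.1, h1.2.trans h2.2.symm, ?_⟩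
    intro k hk1 hk2 hkeq
    have hkocc : k ∈ occsL l c := mem_occsL.mpr ⟨by omega, by rw [hkeq, h2.2]⟩
    rcases h4 k hkocc with h | h <;> omega
  · rintro ⟨h1, h2, h3, h4⟩
    have hp1 : p.1 < l.length := by omega
    obtain ⟨c, hc⟩ : ∃ c, l[p.2]? = some c := ⟨l[p.2]'h2, List.getElem?_eq_getElem h2⟩
    refine ⟨c, ?_, ?_⟩
    · exact List.mem_of_getElem? hc
    · rw [mem_zip_tail sorted_occsL]
      refine ⟨mem_occsL.mpr ⟨hp1, by rw [h3, hc]⟩, mem_occsL.mpr ⟨h2, hc⟩, h1, ?_⟩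
      intro x hx
      rw [mem_occsL] at hx
      by_contra hcon
      push Not at hcon
      have hx2 : l[x]? = l[p.2]? := by rw [hx.2, hc]
      exact h4 x (by omega) (by omega) hx2

theorem sorted_snd_candsA {l : List Char} : (candsA l).Pairwise (fun p q => p.2 < q.2) := by
  rw [candsA, List.pairwise_filterMap]
  apply List.Pairwise.imp ?_ (List.pairwise_lt_range (n := l.length))
  intro i j hij x hx y hy
  simp only [Option.map_eq_some_iff] at hx hy
  obtain ⟨a, _, rfl⟩ := hx
  obtain ⟨b, _, rfl⟩ := hy
  exact hij

-- B's grouping loop builds the per-character occurrence table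
theorem B_loop (t : List Char) :
    ((PySem.List.enumerate t).foldl
      (fun (d : PySem.Dict Char (List Int)) (p : Int × Char) =>
        d.insert p.2 (d.getD p.2 [] ++ [p.1]))
      PySem.Dict.empty) =
    ⟨(PySem.Set.ofList t).map (fun c => (c, (occsL t c).map (fun (i : Nat) => (i : Int))))⟩ := by
  induction t using List.reverseRecOn with
  | nil => simp [PySem.List.enumerate, PySem.Set.ofList, PySem.Set.empty, PySem.Dict.empty, occsL]
  | append_singleton t c ih =>
    rw [PySem.List.enumerate_append, List.foldl_append, ih]
    simp only [PySem.List.enumerate_cons, PySem.List.enumerate_nil, List.foldl_cons, List.foldl_nil,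
      zero_add]
    set S := PySem.Set.ofList t with hSdef
    have hSnodup : S.Nodup := PySem.Set.nodup_ofList t
    set g := fun c' => (c', (occsL t c').map (fun (i : Nat) => (i : Int))) with hgdef
    have hfind : (PySem.Dict.mk (S.map g)).get? c =
        if c ∈ t then some ((occsL t c).map (fun (i : Nat) => (i : Int))) else none := by
      rw [PySem.Dict.get?]
      show (List.find? (fun p => p.1 == c) (S.map g)).map (·.2) = _
      rw [List.find?_map]
      have : ((fun p : Char × List Int => p.1 == c) ∘ g) = (fun x => x == c) := by
        funext x; rfl
      rw [this]
      by_cases hc : c ∈ t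
      · rw [find?_beq_of_nodup hSnodup (by rw [hSdef, PySem.Set.mem_ofList]; exact hc)]
        simp [hc, hgdef]
      · rw [find?_beq_of_not_mem (by rw [hSdef, PySem.Set.mem_ofList]; exact hc)]
        simp [hc]
    have hcontains : (PySem.Dict.mk (S.map g)).contains c = (c ∈ t : Bool) := by
      rw [PySem.Dict.contains]
      show ((S.map g).any fun p => p.1 == c) = _
      rw [List.any_map]
      have : ((fun p : Char × List Int => p.1 == c) ∘ g) = (fun x => x == c) := by
        funext x; rfl
      rw [this]
      by_cases hc : c ∈ t
      · simp only [hc, decide_true]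
        rw [List.any_eq_true]
        exact ⟨c, by rw [hSdef, PySem.Set.mem_ofList]; exact hc, by simp⟩
      · simp only [hc, decide_false]
        rw [List.any_eq_false]
        intro x hx
        simp only [beq_iff_eq]
        rintro rfl
        exact hc (by rwa [hSdef, PySem.Set.mem_ofList] at hx)
    rw [PySem.Dict.insert]
    by_cases hc : c ∈ t
    · rw [if_pos (by rw [hcontains]; simp [hc])]
      congr 1
      rw [ofList_append_singleton, if_pos hc]
      rw [← hSdef, List.map_map]
      apply List.ext_getElem (by simp)
      intro i h1 h2
      simp only [List.length_map] at h1 h2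
      simp only [List.getElem_map, Function.comp_apply]
      simp only [PySem.Dict.getD]; rw [hfind]
      simp only [hc, if_pos, Option.getD_some]
      by_cases hx : (g S[i]).1 == c
      · simp only [hx, if_pos]
        have hxc : S[i] = c := by simpa [hgdef] using hx
        rw [occsL_append_singleton, hxc]
        simp
      · simp only [hx]
        simp only [Bool.false_eq_true, if_false]
        have hxc : S[i] ≠ c := by simpa [hgdef] using hx
        rw [occsL_append_singleton]
        rw [if_neg (fun h => hxc h.symm)]
        simp [hgdef]
    · rw [if_neg (by rw [hcontains]; simp [hc])]
      congr 1
      rw [ofList_append_singleton, if_neg hc, ← hSdef, List.map_append]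
      congr 1
      · apply List.map_congr_left
        intro x hx
        have hxc : x ≠ c := by
          rintro rfl
          exact hc (by rwa [hSdef, PySem.Set.mem_ofList] at hx)
        rw [occsL_append_singleton]
        simp [hgdef, Ne.symm hxc]
      · simp only [List.map_singleton]
        simp only [PySem.Dict.getD]; rw [hfind, if_neg hc]
        rw [occsL_append_singleton, if_pos rfl]
        have : occsL t c = [] := by
          rw [List.eq_nil_iff_forall_not_mem]
          intro i hi
          rw [occsL, List.mem_filter] at hi
          have := hi.2
          simp only [decide_eq_true_eq] at this
          exact hc (List.mem_of_getElem? this)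
        simp [this]


-- encoding of the optional best pair as B's (length, cur, prev) Int triple
def encodeT (r : Option (Nat × Nat)) : Option (Int × Int × Int) :=
  r.map (fun q => (((q.2 - q.1 - 1 : Nat) : Int), ((q.2 : Nat) : Int), ((q.1 : Nat) : Int)))

theorem foldl_inner_flatMap {α β : Type} (step : β → Int × Int → β)
    (F : α → List (Int × Int)) :
    ∀ (xs : List α) (b : β),
      xs.foldl (fun b x => (F x).foldl step b) b = (xs.flatMap F).foldl step b := by
  intro xs
  induction xs with
  | nil => intro b; rfl
  | cons x xs ih =>
    intro b
    rw [List.foldl_cons, List.flatMap_cons, List.foldl_append, ih]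

theorem stepInt_encode (ps : List (Nat × Nat)) :
    ∀ (b : Option (Nat × Nat)), (∀ p ∈ ps, p.1 < p.2) → (∀ q, b = some q → q.1 < q.2) →
      (ps.map (fun p => ((p.1 : Int), (p.2 : Int)))).foldl
        (fun (b : Option (Int × Int × Int)) (pc : Int × Int) =>
          let prev := pc.1
          let cur := pc.2
          let length := cur - prev - 1
          match b with
          | none => some (length, cur, prev)
          | some (bl, bc, bp) =>
              if length < bl ∨ (length = bl ∧ cur < bc) then some (length, cur, prev)
              else some (bl, bc, bp))
        (encodeT b) = encodeT (selFold pickLex b ps) := by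
  induction ps with
  | nil => intro b _ _; rfl
  | cons p ps ih =>
    intro b hps hb
    rw [List.map_cons, List.foldl_cons]
    have hp : p.1 < p.2 := hps p List.mem_cons_self
    have hstep : (fun (b : Option (Int × Int × Int)) (pc : Int × Int) =>
          let prev := pc.1
          let cur := pc.2
          let length := cur - prev - 1
          match b with
          | none => some (length, cur, prev)
          | some (bl, bc, bp) =>
              if length < bl ∨ (length = bl ∧ cur < bc) then some (length, cur, prev)
              else some (bl, bc, bp)) (encodeT b) ((p.1 : Int), (p.2 : Int)) =
        encodeT (selFold pickLex b [p]) := by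
      rcases b with _ | q
      · rw [selFold_singleton_none]
        show some ((p.2 : Int) - (p.1 : Int) - 1, (p.2 : Int), (p.1 : Int)) = _
        simp only [encodeT, Option.map_some]
        congr 1
        congr 1
        omega
      · have hq : q.1 < q.2 := hb q rfl
        rw [selFold_singleton_some]
        show (if (p.2 : Int) - (p.1 : Int) - 1 < ((q.2 - q.1 - 1 : Nat) : Int) ∨
              ((p.2 : Int) - (p.1 : Int) - 1 = ((q.2 - q.1 - 1 : Nat) : Int) ∧ (p.2 : Int) < ((q.2 : Nat) : Int))
            then some ((p.2 : Int) - (p.1 : Int) - 1, (p.2 : Int), (p.1 : Int))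
            else some (((q.2 - q.1 - 1 : Nat) : Int), ((q.2 : Nat) : Int), ((q.1 : Nat) : Int))) = _
        by_cases hpick : pickLex p q = true
        · rw [if_pos (by simp only [pickLex, decide_eq_true_eq] at hpick; omega)]
          rw [if_pos hpick]
          simp only [encodeT, Option.map_some]
          congr 1
          congr 1
          omega
        · rw [if_neg (by simp only [pickLex, decide_eq_true_eq] at hpick; omega)]
          rw [if_neg hpick]
          rfl
    have hinv : ∀ x, selFold pickLex b [p] = some x → x.1 < x.2 := by
      intro x hx
      rcases b with _ | q
      · rw [selFold_singleton_none] at hx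
        cases hx
        exact hp
      · rw [selFold_singleton_some] at hx
        split_ifs at hx <;> cases hx
        · exact hp
        · exact hb _ rfl
    refine Eq.trans ?_ (ih (selFold pickLex b [p]) (fun x hx => hps x (List.mem_cons_of_mem _ hx)) hinv)
    exact congrArg (fun ini => List.foldl _ ini (List.map (fun p => ((p.1 : Int), (p.2 : Int))) ps)) hstep

theorem zip_tail_map {α β : Type} (f : α → β) (o : List α) :
    (o.map f).zip ((o.map f).tail) = (o.zip o.tail).map (fun p => (f p.1, f p.2)) := by
  induction o with
  | nil => rfl
  | cons a o ih =>
    cases o with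
    | nil => rfl
    | cons b o' =>
      exact congrArg (List.cons (f a, f b)) ih

theorem alt_eq_render (s : String) :
    smallest_gap_alt s = renderS s (selFold pickLex none (candsB s.toList)) := by
  rw [smallest_gap_alt]
  rw [B_loop s.toList]
  have hvals : (PySem.Dict.mk ((PySem.Set.ofList s.toList).map
        (fun c => (c, (occsL s.toList c).map (fun (i : Nat) => (i : Int)))))).values =
      (PySem.Set.ofList s.toList).map (fun c => (occsL s.toList c).map (fun (i : Nat) => (i : Int))) := by
    rw [PySem.Dict.values]
    show List.map _ (List.map _ _) = _
    rw [List.map_map]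
    rfl
  rw [hvals]
  have hzip : ∀ c, ((occsL s.toList c).map (fun (i : Nat) => (i : Int))).zip
        (((occsL s.toList c).map (fun (i : Nat) => (i : Int))).tail) =
      ((occsL s.toList c).zip (occsL s.toList c).tail).map
        (fun p => ((p.1 : Int), (p.2 : Int))) := by
    intro c
    exact zip_tail_map _ _
  have hbest : ((PySem.Set.ofList s.toList).map
        (fun c => (occsL s.toList c).map (fun (i : Nat) => (i : Int)))).foldl
      (fun b idxs =>
        (idxs.zip idxs.tail).foldl
          (fun (b : Option (Int × Int × Int)) (pc : Int × Int) =>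
            let prev := pc.1
            let cur := pc.2
            let length := cur - prev - 1
            match b with
            | none => some (length, cur, prev)
            | some (bl, bc, bp) =>
                if length < bl ∨ (length = bl ∧ cur < bc) then some (length, cur, prev)
                else some (bl, bc, bp))
          b)
      none = encodeT (selFold pickLex none (candsB s.toList)) := by
    rw [List.foldl_map]
    have : ∀ (b : Option (Int × Int × Int)),
        (PySem.Set.ofList s.toList).foldl
          (fun b c =>
            ((((occsL s.toList c).map (fun (i : Nat) => (i : Int)))).zip
              ((((occsL s.toList c).map (fun (i : Nat) => (i : Int))))).tail).foldl
              (fun (b : Option (Int × Int × Int)) (pc : Int × Int) =>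
                let prev := pc.1
                let cur := pc.2
                let length := cur - prev - 1
                match b with
                | none => some (length, cur, prev)
                | some (bl, bc, bp) =>
                    if length < bl ∨ (length = bl ∧ cur < bc) then some (length, cur, prev)
                    else some (bl, bc, bp))
              b)
          b =
        ((PySem.Set.ofList s.toList).flatMap
          (fun c => (((occsL s.toList c).zip (occsL s.toList c).tail).map
            (fun p => ((p.1 : Int), (p.2 : Int)))))).foldl
          (fun (b : Option (Int × Int × Int)) (pc : Int × Int) =>
            let prev := pc.1
            let cur := pc.2
            let length := cur - prev - 1
            match b with
            | none => some (length, cur, prev)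
            | some (bl, bc, bp) =>
                if length < bl ∨ (length = bl ∧ cur < bc) then some (length, cur, prev)
                else some (bl, bc, bp))
          b := by
      intro b
      rw [← foldl_inner_flatMap]
      apply PySem.List.foldl_congr_mem
      intro acc x hx
      rw [hzip x]
    rw [this none]
    rw [← List.map_flatMap]
    rw [show ((PySem.Set.ofList s.toList).flatMap
        (fun c => (occsL s.toList c).zip (occsL s.toList c).tail)) = candsB s.toList from rfl]
    have := stepInt_encode (candsB s.toList) none
      (fun p hp => (mem_candsB.mp hp).1) (by rintro q ⟨⟩)
    rw [← this]
    rfl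
  rw [hbest]
  rcases selFold pickLex none (candsB s.toList) with _ | q
  · rfl
  · show PySem.Str.slice s (some (((q.1 : Nat) : Int) + 1)) (some ((q.2 : Nat) : Int)) = _
    rfl

-- ===== VERDICT (by name: the statement is the Claim_ definition above) =====
theorem smallest_gap_spec : Claim_equal_smallest_gap := by
  intro s _
  show smallest_gap s = smallest_gap_alt s
  have hA : smallest_gap s = renderS s (selFold pickLen none (candsA s.toList)) := by
    rw [smallest_gap]
    rw [A_loop s s.toList (le_refl _)]
  rw [hA, alt_eq_render]
  rw [selFold_len_eq_lex sorted_snd_candsA]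
  congr 1
  exact selFold_lex_ext (fun p hp => (mem_candsA.mp hp).1) (fun p hp => (mem_candsB.mp hp).1)
    (fun p => mem_candsA.trans mem_candsB.symm)
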